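-- pv_equiv track=rewrite | github.com/suddu22/Competitive_Programming_Problems | Booking/partialAnagram.py | partialAnagram
-- ===== SOURCE A (Python) =====
-- def partialAnagram(word, target):
--
--     char_dict = {}
--
--     for c in word:
--         if c in char_dict:
--             char_dict[c] += 1
--         else:
--             char_dict[c] = 1
--
--     for c in target:
--         if c not in char_dict or char_dict[c] == 0:
--             return False
--         else:
--             char_dict[c] -= 1
--
--     return True
-- ===== SOURCE B (Python) =====
-- def partialAnagram(word, target):
--     return all(target.count(c) <= word.count(c) for c in target)
-- ===== Notes on version B (the rewrite author's own statement) =====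
-- stated objective: simpler
-- what changed: Replaces the incremental build-a-dict-then-consume loops (with membership/zero branches and early return) by a single whole-string multiset comparison: every character of target must occur in target at most as often as in word.
import Mathlib
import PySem

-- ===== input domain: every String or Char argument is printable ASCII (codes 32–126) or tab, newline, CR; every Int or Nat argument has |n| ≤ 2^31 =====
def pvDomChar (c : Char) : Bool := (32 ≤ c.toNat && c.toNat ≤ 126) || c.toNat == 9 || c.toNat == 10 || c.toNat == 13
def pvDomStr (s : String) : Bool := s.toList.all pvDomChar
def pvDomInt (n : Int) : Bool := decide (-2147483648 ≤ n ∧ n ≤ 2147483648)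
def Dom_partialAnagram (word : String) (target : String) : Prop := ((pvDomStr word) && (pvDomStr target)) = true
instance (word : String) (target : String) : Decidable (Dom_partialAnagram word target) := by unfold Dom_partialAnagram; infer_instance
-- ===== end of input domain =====

-- B replaces A's build-a-counting-dict-then-consume loops by a single whole-string
-- multiset comparison (every char occurs in target at most as often as in word); simpler, not faster.

-- ===== PORT A =====
-- first loop: build char_dict counting the characters of word
def pvBuildA (d : PySem.Dict Char Int) (c : Char) : PySem.Dict Char Int :=
  if d.contains c then d.insert c (d.getD c 0 + 1) else d.insert c 1

-- second loop with early return False; 'char_dict[c] -= 1' ported as getD/insert,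
-- exact because the branch guard guarantees the key is present
def pvConsumeA (d : PySem.Dict Char Int) : List Char → Bool
  | [] => true
  | c :: rest =>
      if !d.contains c || d.getD c 0 == 0 then false
      else pvConsumeA (d.insert c (d.getD c 0 - 1)) rest

def partialAnagram (word : String) (target : String) : Bool :=
  pvConsumeA (word.toList.foldl pvBuildA PySem.Dict.empty) target.toList

-- ===== PORT B =====
-- Source B: return all(target.count(c) <= word.count(c) for c in target)
-- (str.count with a single-character needle = occurrence count of that character)
def partialAnagram_alt (word : String) (target : String) : Bool :=
  target.toList.all (fun c => decide (target.toList.count c ≤ word.toList.count c))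

-- ===== PRECONDITION & SPEC =====
def Spec_partialAnagram (word : String) (target : String) (out : Bool) : Prop := out = partialAnagram_alt word target
instance (word : String) (target : String) (out : Bool) : Decidable (Spec_partialAnagram word target out) := by unfold Spec_partialAnagram; infer_instance

-- ===== CLAIM (what is proved, stated in full; the proofs are below) =====
def Claim_equal_partialAnagram : Prop := ∀ (word : String) (target : String), Dom_partialAnagram word target → Spec_partialAnagram word target (partialAnagram word target)

-- ===== LEMMAS AND PROOFS =====

-- the dict after A's first loop, modelled by a Char → Option Nat table
theorem pvBuildA_inv (ws : List Char) (d : PySem.Dict Char Int) (g : Char → Option Nat)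
    (hg : ∀ c, d.get? c = (g c).map (fun n => (n : Int))) :
    ∀ c, (ws.foldl pvBuildA d).get? c =
      (if (g c).isNone ∧ ws.count c = 0 then none
       else some (((g c).getD 0 + ws.count c : Nat) : Int)) := by
  induction ws generalizing d g with
  | nil =>
      intro c
      cases hgc : g c with
      | none => simp [hgc, hg c]
      | some k => simp [hgc, hg c]
  | cons w rest ih =>
      intro c
      have hstep : ∀ x, (pvBuildA d w).get? x =
          ((fun x => if x = w then some ((g x).getD 0 + 1) else g x) x).map (fun n => (n : Int)) := by
        intro x
        unfold pvBuildA
        have hcont : d.contains w = ((g w).isSome) := by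
          rw [PySem.Dict.contains_eq_isSome_get?, hg w]; cases g w <;> rfl
        rw [hcont]
        cases hgw : g w with
        | none =>
            simp only [Option.isSome_none, Bool.false_eq_true, if_false, PySem.Dict.get?_insert]
            by_cases hx : x = w
            · simp [hx, hgw]
            · simp [hx, hg x]
        | some k =>
            have hgd : d.getD w 0 = (k : Int) := by
              rw [PySem.Dict.getD_eq_get?_getD, hg w, hgw]; rfl
            simp only [Option.isSome_some, if_true, PySem.Dict.get?_insert, hgd]
            by_cases hx : x = w
            · simp [hx, hgw]
            · simp [hx, hg x]
      have hrec := ih (pvBuildA d w) _ hstep c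
      simp only [List.foldl_cons] at *
      by_cases hc : c = w
      · subst hc
        rw [hrec, if_pos rfl]
        have h2 : List.count c (c :: rest) = List.count c rest + 1 := by simp
        rw [h2]
        simp only [Option.isNone_some, Bool.false_eq_true, false_and, if_false, Option.getD_some]
        rw [if_neg (by simp)]
        congr 1
        omega
      · have hc' : ¬w = c := fun h' => hc h'.symm
        rw [hrec]
        simp [hc, hc']

-- A's consuming loop succeeds iff every character demand fits the remaining table
theorem pvConsumeA_iff (ts : List Char) (d : PySem.Dict Char Int) (g : Char → Option Nat)
    (hg : ∀ c, d.get? c = (g c).map (fun n => (n : Int))) :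
    (pvConsumeA d ts = true ↔ ∀ c, ts.count c ≤ (g c).getD 0) := by
  induction ts generalizing d g with
  | nil => simp [pvConsumeA]
  | cons t rest ih =>
      have hcont : d.contains t = ((g t).isSome) := by
        rw [PySem.Dict.contains_eq_isSome_get?, hg t]; cases g t <;> rfl
      cases hgt : g t with
      | none =>
          simp only [pvConsumeA, hcont, hgt, Option.isSome_none, Bool.not_false, Bool.true_or,
            if_pos]
          constructor
          · intro h; cases h
          · intro h
            have := h t
            simp [hgt, List.count_cons_self] at this
      | some k =>
          have hgd : d.getD t 0 = (k : Int) := by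
            rw [PySem.Dict.getD_eq_get?_getD, hg t, hgt]; rfl
          by_cases hk : k = 0
          · subst hk
            simp only [pvConsumeA, hcont, hgt, Option.isSome_some, Bool.not_true, Bool.false_or,
              hgd]
            simp only [Nat.cast_zero, beq_self_eq_true, if_pos]
            constructor
            · intro h; cases h
            · intro h
              have := h t
              simp [hgt, List.count_cons_self] at this
          · have hne : (d.getD t 0 == 0) = false := by
              simp [hgd]; exact_mod_cast hk
            simp only [pvConsumeA, hcont, hgt, Option.isSome_some, Bool.not_true, Bool.false_or,
              hne, Bool.false_eq_true, if_false]
            have hstep : ∀ x, (d.insert t (d.getD t 0 - 1)).get? x =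
                ((fun x => if x = t then some (k - 1) else g x) x).map (fun n => (n : Int)) := by
              intro x
              rw [PySem.Dict.get?_insert]
              by_cases hx : x = t
              · simp only [hx, hgd]
                have : (k : Int) - 1 = ((k - 1 : Nat) : Int) := by omega
                simp [this]
              · simp [hx, hg x]
            rw [ih _ _ hstep]
            constructor
            · intro h c
              by_cases hc : c = t
              · subst hc
                have h1 := h c
                simp at h1
                simp [hgt]
                omega
              · have hc' : ¬t = c := fun h' => hc h'.symm
                have h1 := h c
                simp [hc] at h1
                simpa [hc'] using h1
            · intro h c
              by_cases hc : c = t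
              · subst hc
                have h1 := h c
                simp [hgt] at h1
                simp
                omega
              · have hc' : ¬t = c := fun h' => hc h'.symm
                have h1 := h c
                simp [hc'] at h1
                simpa [hc] using h1

theorem partialAnagram_iff (word target : String) :
    partialAnagram word target = true ↔
      ∀ c, target.toList.count c ≤ word.toList.count c := by
  unfold partialAnagram
  have hbuild := pvBuildA_inv word.toList PySem.Dict.empty (fun _ => none)
    (by intro c; simp [PySem.Dict.get?_empty])
  have hg : ∀ c, (word.toList.foldl pvBuildA PySem.Dict.empty).get? c =
      ((fun c => if word.toList.count c = 0 then none else some (word.toList.count c)) c).map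
        (fun n => (n : Int)) := by
    intro c
    rw [hbuild c]
    by_cases h : word.toList.count c = 0 <;> simp [h]
  rw [pvConsumeA_iff _ _ _ hg]
  constructor
  · intro h c
    have := h c
    by_cases hw : word.toList.count c = 0 <;> simpa [hw] using this
  · intro h c
    have := h c
    by_cases hw : word.toList.count c = 0 <;> simpa [hw] using this

theorem partialAnagram_alt_iff (word target : String) :
    partialAnagram_alt word target = true ↔
      ∀ c, target.toList.count c ≤ word.toList.count c := by
  unfold partialAnagram_alt
  rw [List.all_eq_true]
  constructor
  · intro h c
    by_cases hc : c ∈ target.toList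
    · simpa using h c hc
    · simp [List.count_eq_zero_of_not_mem hc]
  · intro h c hc
    simpa using h c

-- ===== VERDICT (by name: the statement is the Claim_ definition above) =====
theorem partialAnagram_spec : Claim_equal_partialAnagram := by
  intro word target _
  unfold Spec_partialAnagram
  have h : partialAnagram word target = true ↔ partialAnagram_alt word target = true :=
    (partialAnagram_iff word target).trans (partialAnagram_alt_iff word target).symm
  cases hA : partialAnagram word target <;> cases hB : partialAnagram_alt word target <;> simp_all
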